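-- pv_equiv track=rewrite | github.com/kdgit83/KD-Learning-and-Practice-Projects | PyCharm/Udemy/Course_KrishNaik_PythonBootcamp/S09_Pattern_Practice/14_hollow_inverted_right_triangle.py | generate_hollow_inverted_right_angled_triangle
-- ===== SOURCE A (Python) =====
-- def generate_hollow_inverted_right_angled_triangle(n: int) -> list[str]:
--     """
--     Function to return a hollow inverted right-angled triangle of '*' of side n as a list of strings.
--
--     Parameters:
--     n (int): The height of the triangle.
--
--     Returns:
--     list: A list of strings where each string represents a row of the triangle.
--
--     Output:
--     A list of strings where each string represents a row in the hollow inverted right-angled triangle.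
--
--     Example:
--     Input: 4
--     Output: ['****', '* *', '**', '*']
--
--     Input: 5
--     Output: ['*****', '*  *', '* *', '**', '*']
--     """
--     # Your code here
--     triangle = []
--     for i in range(n, 0, -1):
--         if i == n or i == 1:
--             row = '*' * i
--         else:
--             row = '*' + ' ' * (i - 2) + '*'
--         triangle.append(row)
--     return triangle
-- ===== SOURCE B (Python) =====
-- def generate_hollow_inverted_right_angled_triangle(n: int) -> list[str]:
--     return [''.join('*' if (i == n or j == 0 or j == i - 1) else ' '
--                     for j in range(i))
--             for i in range(n, 0, -1)]
-- ===== Notes on version B (the rewrite author's own statement) =====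
-- stated objective: alternative
-- what changed: B treats the triangle as a grid and decides each cell by a border predicate (top row, left column, diagonal) per column index, replacing A's per-row branching and string-repetition concatenation.
import Mathlib
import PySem

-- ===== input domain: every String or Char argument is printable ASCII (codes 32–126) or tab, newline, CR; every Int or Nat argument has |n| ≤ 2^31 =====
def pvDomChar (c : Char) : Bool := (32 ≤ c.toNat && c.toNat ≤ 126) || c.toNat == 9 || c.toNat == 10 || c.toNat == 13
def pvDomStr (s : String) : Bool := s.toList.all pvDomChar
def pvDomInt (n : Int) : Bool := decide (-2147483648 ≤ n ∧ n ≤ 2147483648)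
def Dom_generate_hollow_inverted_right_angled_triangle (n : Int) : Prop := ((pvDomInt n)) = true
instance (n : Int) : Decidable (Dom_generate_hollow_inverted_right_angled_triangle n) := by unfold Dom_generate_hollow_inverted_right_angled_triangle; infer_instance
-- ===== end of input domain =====

-- B builds each row cell-by-cell from a border predicate over column indices instead of A's
-- per-row branch with string repetition; objective: alternative decomposition, same cost.

-- ===== PORT A =====
-- '*' * i and ' ' * (i - 2) on strings are PySem.List.pyRepeat on the character lists (exact,
-- including the empty result for a non-positive count); '+' on strings is List append on chars.
def generate_hollow_inverted_right_angled_triangle (n : Int) : List String :=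
  (PySem.List.pyRange n 0 (-1)).foldl
    (fun triangle i =>
      let row : String :=
        if i == n || i == 1 then
          String.ofList (PySem.List.pyRepeat ['*'] i)
        else
          String.ofList (['*'] ++ PySem.List.pyRepeat [' '] (i - 2) ++ ['*'])
      triangle ++ [row]) []

-- ===== PORT B =====
-- ''.join of the single-character strings of the inner comprehension is String.ofList of the
-- corresponding character list (exact: each joined piece is exactly one character).
def generate_hollow_inverted_right_angled_triangle_alt (n : Int) : List String :=
  (PySem.List.pyRange n 0 (-1)).map
    (fun i =>
      String.ofList ((PySem.List.pyRange 0 i 1).map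
        (fun j => if i == n || j == 0 || j == i - 1 then '*' else ' ')))

-- ===== PRECONDITION & SPEC =====
def Spec_generate_hollow_inverted_right_angled_triangle (n : Int) (out : List String) : Prop := out = generate_hollow_inverted_right_angled_triangle_alt n
instance (n : Int) (out : List String) : Decidable (Spec_generate_hollow_inverted_right_angled_triangle n out) := by unfold Spec_generate_hollow_inverted_right_angled_triangle; infer_instance

-- ===== CLAIM (what is proved, stated in full; the proofs are below) =====
def Claim_equal_generate_hollow_inverted_right_angled_triangle : Prop := ∀ (n : Int), Dom_generate_hollow_inverted_right_angled_triangle n → Spec_generate_hollow_inverted_right_angled_triangle n (generate_hollow_inverted_right_angled_triangle n)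

-- ===== LEMMAS AND PROOFS =====

-- A border-predicate row of width m+2 is star, m spaces, star.
theorem pvGridRow (m : Nat) :
    (List.range (m + 2)).map (fun k => if k = 0 ∨ k = m + 1 then '*' else ' ')
    = '*' :: (List.replicate m ' ' ++ ['*']) := by
  rw [List.range_succ_eq_map]
  simp only [List.map_cons, List.map_map]
  congr 1
  rw [List.range_succ, List.map_append]
  have hmid : ∀ k ∈ List.range m,
      ((fun k => if k = 0 ∨ k = m + 1 then '*' else ' ') ∘ Nat.succ) k = ' ' := by
    intro k hk
    simp only [List.mem_range] at hk
    simp only [Function.comp]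
    rw [if_neg (by omega)]
  rw [List.map_congr_left hmid]
  simp

-- The two row constructions agree for every row index 1 ≤ i ≤ n.
theorem pvRow_eq (n i : Int) (h1 : 1 ≤ i) (h2 : i ≤ n) :
    (if i == n || i == 1 then String.ofList (PySem.List.pyRepeat ['*'] i)
     else String.ofList (['*'] ++ PySem.List.pyRepeat [' '] (i - 2) ++ ['*']))
    = String.ofList ((PySem.List.pyRange 0 i 1).map
        (fun j => if i == n || j == 0 || j == i - 1 then '*' else ' ')) := by
  rw [PySem.List.pyRange_one]
  by_cases hn : i = n
  · -- top row: every cell is a star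
    simp only [hn, BEq.rfl, Bool.true_or, if_pos]
    rw [PySem.List.pyRepeat_singleton]
    congr 1
    simp [Function.comp_def]
  · have hnb : (i == n) = false := by simp [hn]
    by_cases h1' : i = 1
    · subst h1'
      simp [hnb, PySem.List.pyRepeat_singleton, List.range_succ]
    · -- interior row: left border, spaces, right border
      have hi2 : 2 ≤ i := by omega
      rw [if_neg (by simp [hn, h1'])]
      congr 1
      rw [PySem.List.pyRepeat_singleton, List.map_map]
      have hm : (i - 0).toNat = (i - 2).toNat + 2 := by omega
      rw [hm]
      have hcond : ∀ k ∈ List.range ((i - 2).toNat + 2),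
          ((fun j => if i == n || j == 0 || j == i - 1 then '*' else ' ')
            ∘ (fun k : Nat => (0 : Int) + k)) k
          = (if k = 0 ∨ k = (i - 2).toNat + 1 then '*' else ' ') := by
        intro k hk
        simp only [List.mem_range] at hk
        simp only [Function.comp]
        by_cases h0 : k = 0
        · subst h0; simp
        · by_cases hl : k = (i - 2).toNat + 1
          · subst hl
            have hb2 : ((0 : Int) + (((i - 2).toNat + 1 : Nat) : Int) == i - 1) = true := by
              simp only [beq_iff_eq]; push_cast; omega
            rw [hb2, Bool.or_true, if_pos rfl, if_pos (Or.inr rfl)]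
          · have e0 : ((0 : Int) + (k : Int) == 0) = false := by
              simp only [beq_eq_false_iff_ne]; omega
            have e1 : ((0 : Int) + (k : Int) == i - 1) = false := by
              simp only [beq_eq_false_iff_ne]; intro h; omega
            rw [hnb, e0, e1]
            simp [h0, hl]
      rw [List.map_congr_left hcond, pvGridRow ((i - 2).toNat)]
      simp

-- ===== VERDICT (by name: the statement is the Claim_ definition above) =====
theorem generate_hollow_inverted_right_angled_triangle_spec : Claim_equal_generate_hollow_inverted_right_angled_triangle := by
  intro n _
  unfold Spec_generate_hollow_inverted_right_angled_triangle
  unfold generate_hollow_inverted_right_angled_triangle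
    generate_hollow_inverted_right_angled_triangle_alt
  rw [PySem.List.foldl_append_singleton_eq_map, List.nil_append]
  apply List.map_congr_left
  intro i hi
  rw [PySem.List.mem_pyRange_neg_one] at hi
  exact pvRow_eq n i (by omega) (by omega)
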